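-- pv_equiv track=rewrite | github.com/Aggelusi/AggelusBot | bot/database/db.py | build_nation_pool
-- ===== SOURCE A (Python) =====
-- DEFAULT_MAJOR_COOPS = {
-- 	"usa": 1,
-- 	"uk": 1,
-- 	"ger": 2,
-- 	"ita": 1,
-- 	"sov": 3,
-- 	"japan": 2,
-- }
--
-- _MAJOR_NATION_LABELS = {
-- 	"usa": "USA 🇺🇸",
-- 	"uk": "UK 🇬🇧",
-- 	"ger": "GER 🇩🇪",
-- 	"ita": "ITA 🇮🇹",
-- 	"sov": "SOV 🇷🇺",
-- 	"japan": "JAPAN 🇯🇵",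
-- }
--
-- def build_nation_pool(coop_overrides: dict[str, int] | None = None) -> list[str]:
-- 	"""Build the reservation nation list with configurable co-op slots."""
-- 	coop_values = dict(DEFAULT_MAJOR_COOPS)
-- 	if coop_overrides:
-- 		for key, value in coop_overrides.items():
-- 			if key in coop_values:
-- 				coop_values[key] = max(0, int(value))
--
-- 	nations = [
-- 		# Allies
-- 		_MAJOR_NATION_LABELS["usa"],
-- 		_MAJOR_NATION_LABELS["uk"],
-- 		"FRA 🇫🇷",
-- 		"POL 🇵🇱",
-- 		"RAJ 🇮🇳",
-- 		"CAN 🇨🇦",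
-- 		"SAF 🇿🇦",
-- 		"AST 🇦🇺",
-- 		"BRA 🇧🇷",
-- 		"MEX 🇲🇽",
-- 		"NET 🇳🇱",
--
-- 		# Axis
-- 		_MAJOR_NATION_LABELS["ger"],
-- 		_MAJOR_NATION_LABELS["ita"],
-- 		"ROM 🇷🇴",
-- 		"HUN 🇭🇺",
-- 		"BUL 🇧🇬",
-- 		"FIN 🇫🇮",
-- 		"SPN 🇪🇸",
-- 		"YUG 🇷🇸",
-- 		"DEN 🇩🇰",
-- 		"VICHY 🇫🇷",
--
-- 		# Comintern
-- 		_MAJOR_NATION_LABELS["sov"],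
-- 		"MON 🇲🇳",
--
-- 		# GEACPS
-- 		_MAJOR_NATION_LABELS["japan"],
-- 		"MAN 🇨🇳",
-- 		"SIA 🇹🇭",
-- 	]
--
-- 	for key, nation_label in _MAJOR_NATION_LABELS.items():
-- 		coop_count = coop_values[key]
-- 		insert_index = nations.index(nation_label) + 1
-- 		for i in range(coop_count):
-- 			nations.insert(insert_index + i, f"{nation_label} (Co-op {i + 1})")
--
-- 	return nations
-- ===== SOURCE B (Python) =====
-- DEFAULT_MAJOR_COOPS = {
-- 	"usa": 1,
-- 	"uk": 1,
-- 	"ger": 2,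
-- 	"ita": 1,
-- 	"sov": 3,
-- 	"japan": 2,
-- }
--
-- # Ordered base list annotated with the co-op key of each major nation (None = minor).
-- _BASE_ORDER = [
-- 	("USA 🇺🇸", "usa"),
-- 	("UK 🇬🇧", "uk"),
-- 	("FRA 🇫🇷", None),
-- 	("POL 🇵🇱", None),
-- 	("RAJ 🇮🇳", None),
-- 	("CAN 🇨🇦", None),
-- 	("SAF 🇿🇦", None),
-- 	("AST 🇦🇺", None),
-- 	("BRA 🇧🇷", None),
-- 	("MEX 🇲🇽", None),
-- 	("NET 🇳🇱", None),
-- 	("GER 🇩🇪", "ger"),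
-- 	("ITA 🇮🇹", "ita"),
-- 	("ROM 🇷🇴", None),
-- 	("HUN 🇭🇺", None),
-- 	("BUL 🇧🇬", None),
-- 	("FIN 🇫🇮", None),
-- 	("SPN 🇪🇸", None),
-- 	("YUG 🇷🇸", None),
-- 	("DEN 🇩🇰", None),
-- 	("VICHY 🇫🇷", None),
-- 	("SOV 🇷🇺", "sov"),
-- 	("MON 🇲🇳", None),
-- 	("JAPAN 🇯🇵", "japan"),
-- 	("MAN 🇨🇳", None),
-- 	("SIA 🇹🇭", None),
-- ]
--
-- def build_nation_pool(coop_overrides: dict[str, int] | None = None) -> list[str]: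
-- 	"""Build the reservation nation list with configurable co-op slots, in one forward pass."""
-- 	coop_values = dict(DEFAULT_MAJOR_COOPS)
-- 	if coop_overrides:
-- 		for key, value in coop_overrides.items():
-- 			if key in coop_values:
-- 				coop_values[key] = max(0, int(value))
--
-- 	pool: list[str] = []
-- 	for label, key in _BASE_ORDER:
-- 		pool.append(label)
-- 		if key is not None:
-- 			pool.extend(f"{label} (Co-op {i + 1})" for i in range(coop_values[key]))
-- 	return pool
-- ===== Notes on version B (the rewrite author's own statement) =====
-- stated objective: simpler
-- what changed: B builds the pool in one forward pass over an ordered base list annotated with each major nation's co-op key, appending co-op entries inline, instead of A's build-then-.index()/.insert() second phase.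
import Mathlib
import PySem

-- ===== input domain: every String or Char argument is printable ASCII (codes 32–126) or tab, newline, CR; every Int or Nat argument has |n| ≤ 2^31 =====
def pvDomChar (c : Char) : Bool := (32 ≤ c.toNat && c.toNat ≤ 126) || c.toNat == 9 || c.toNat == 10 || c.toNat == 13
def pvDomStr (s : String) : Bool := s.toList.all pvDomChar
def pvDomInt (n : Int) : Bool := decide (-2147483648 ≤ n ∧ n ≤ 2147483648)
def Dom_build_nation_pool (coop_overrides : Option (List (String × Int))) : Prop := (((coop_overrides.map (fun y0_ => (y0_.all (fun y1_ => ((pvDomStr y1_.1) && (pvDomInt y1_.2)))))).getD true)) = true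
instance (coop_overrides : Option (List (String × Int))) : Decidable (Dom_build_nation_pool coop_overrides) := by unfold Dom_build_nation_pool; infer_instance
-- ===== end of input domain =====

-- B builds the pool in one forward pass over an annotated base list instead of A's
-- build-then-.index()/.insert() second phase (objective: simpler).


-- ===== PORT A =====

-- shared constant DEFAULT_MAJOR_COOPS (a module-level dict both Source A and Source B define verbatim)
def DEFAULT_MAJOR_COOPS : PySem.Dict String Int :=
  PySem.Dict.ofList [("usa", 1), ("uk", 1), ("ger", 2), ("ita", 1), ("sov", 3), ("japan", 2)]

-- the override block of both programs, byte-identical in Source A and Source B, so shared here: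
-- coop_values = dict(DEFAULT_MAJOR_COOPS); if coop_overrides: for key, value in …: if key in …: … = max(0, int(value))
-- (int(value) is the identity on an int value)
def coopValues (coop_overrides : Option (List (String × Int))) : PySem.Dict String Int :=
  match coop_overrides with
  | none => DEFAULT_MAJOR_COOPS
  | some l =>
      if l = [] then DEFAULT_MAJOR_COOPS   -- `if coop_overrides:` is false for the empty dict
      else l.foldl (fun d kv => if d.contains kv.1 then d.insert kv.1 (max 0 kv.2) else d) DEFAULT_MAJOR_COOPS

-- f"{label} (Co-op {i + 1})"
def coopLabel (lbl : String) (i : Int) : String := lbl ++ " (Co-op " ++ PySem.Int.toStr (i + 1) ++ ")"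

def MAJOR_NATION_LABELS : PySem.Dict String String :=
  PySem.Dict.ofList [("usa", "USA 🇺🇸"), ("uk", "UK 🇬🇧"), ("ger", "GER 🇩🇪"),
                     ("ita", "ITA 🇮🇹"), ("sov", "SOV 🇷🇺"), ("japan", "JAPAN 🇯🇵")]

def build_nation_pool (coop_overrides : Option (List (String × Int))) : List String :=
  let coop_values := coopValues coop_overrides
  let nations : List String :=
    [ MAJOR_NATION_LABELS.getD "usa" "",   -- _MAJOR_NATION_LABELS["usa"]: key always present, so getD is exact
      MAJOR_NATION_LABELS.getD "uk" "",
      "FRA 🇫🇷", "POL 🇵🇱", "RAJ 🇮🇳", "CAN 🇨🇦", "SAF 🇿🇦", "AST 🇦🇺", "BRA 🇧🇷", "MEX 🇲🇽", "NET 🇳🇱",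
      MAJOR_NATION_LABELS.getD "ger" "",
      MAJOR_NATION_LABELS.getD "ita" "",
      "ROM 🇷🇴", "HUN 🇭🇺", "BUL 🇧🇬", "FIN 🇫🇮", "SPN 🇪🇸", "YUG 🇷🇸", "DEN 🇩🇰", "VICHY 🇫🇷",
      MAJOR_NATION_LABELS.getD "sov" "",
      "MON 🇲🇳",
      MAJOR_NATION_LABELS.getD "japan" "",
      "MAN 🇨🇳", "SIA 🇹🇭" ]
  MAJOR_NATION_LABELS.items.foldl (fun ns p =>
    let coop_count := coop_values.getD p.1 0        -- coop_values[key]: key always present, so getD is exact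
    -- nations.index(nation_label): the label is always present, so getD 0 is exact
    let insert_index : Int := (((PySem.List.index? ns p.2).getD 0 : Nat) : Int) + 1
    (PySem.List.pyRange 0 coop_count 1).foldl
      (fun ns2 i => PySem.List.insert ns2 (insert_index + i) (coopLabel p.2 i)) ns) nations

-- ===== PORT B =====

def BASE_ORDER : List (String × Option String) :=
  [ ("USA 🇺🇸", some "usa"), ("UK 🇬🇧", some "uk"),
    ("FRA 🇫🇷", none), ("POL 🇵🇱", none), ("RAJ 🇮🇳", none), ("CAN 🇨🇦", none), ("SAF 🇿🇦", none),
    ("AST 🇦🇺", none), ("BRA 🇧🇷", none), ("MEX 🇲🇽", none), ("NET 🇳🇱", none),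
    ("GER 🇩🇪", some "ger"), ("ITA 🇮🇹", some "ita"),
    ("ROM 🇷🇴", none), ("HUN 🇭🇺", none), ("BUL 🇧🇬", none), ("FIN 🇫🇮", none), ("SPN 🇪🇸", none),
    ("YUG 🇷🇸", none), ("DEN 🇩🇰", none), ("VICHY 🇫🇷", none),
    ("SOV 🇷🇺", some "sov"), ("MON 🇲🇳", none),
    ("JAPAN 🇯🇵", some "japan"), ("MAN 🇨🇳", none), ("SIA 🇹🇭", none) ]

def build_nation_pool_alt (coop_overrides : Option (List (String × Int))) : List String :=
  let coop_values := coopValues coop_overrides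
  BASE_ORDER.foldl (fun pool p =>
    match p.2 with
    | none => pool ++ [p.1]
    | some k => (pool ++ [p.1]) ++ (PySem.List.pyRange 0 (coop_values.getD k 0) 1).map (coopLabel p.1)) []

-- ===== PRECONDITION & SPEC =====
def Spec_build_nation_pool (coop_overrides : Option (List (String × Int))) (out : List String) : Prop := out = build_nation_pool_alt coop_overrides
instance (coop_overrides : Option (List (String × Int))) (out : List String) : Decidable (Spec_build_nation_pool coop_overrides out) := by unfold Spec_build_nation_pool; infer_instance

-- ===== CLAIM (what is proved, stated in full; the proofs are below) =====
def Claim_equal_build_nation_pool : Prop := ∀ (coop_overrides : Option (List (String × Int))), Dom_build_nation_pool coop_overrides → Spec_build_nation_pool coop_overrides (build_nation_pool coop_overrides)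

-- ===== LEMMAS AND PROOFS =====

lemma coop_hasParen (lbl : String) (i : Int) : '(' ∈ (coopLabel lbl i).toList := by
  have h : '(' ∈ " (Co-op ".toList := by simp
  simp only [coopLabel, String.toList_append, List.mem_append]
  tauto

lemma coop_ne (lbl : String) (i : Int) (T : String) (h : '(' ∉ T.toList) : coopLabel lbl i ≠ T :=
  fun he => h (he ▸ coop_hasParen lbl i)

lemma index_pre (v : String) (pre post : List String) (h : v ∉ pre) :
    PySem.List.index? (pre ++ v :: post) v = some pre.length := by
  rw [PySem.List.index?_eq_some_iff]
  exact ⟨pre, post, rfl, rfl, h⟩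

lemma loopN (lbl : String) (k : Nat) : ∀ (W post : List String) (p : Int), p = W.length →
    List.foldl (fun ns2 i => PySem.List.insert ns2 (p + i) (coopLabel lbl i)) (W ++ post)
      (PySem.List.pyRange 0 (k : Int) 1)
    = W ++ (PySem.List.pyRange 0 (k : Int) 1).map (coopLabel lbl) ++ post := by
  induction k with
  | zero => intro W post p hp; simp [PySem.List.pyRange_one_eq_nil]
  | succ k ih =>
    intro W post p hp
    have hc : ((k + 1 : Nat) : Int) = (k : Int) + 1 := by push_cast; ring
    rw [hc, PySem.List.pyRange_one_succ_right (by positivity), List.foldl_append,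
        ih W post p hp, List.foldl_cons, List.foldl_nil, List.map_append]
    have hlen : ((PySem.List.pyRange 0 (k : Int) 1).map (coopLabel lbl)).length = k := by
      simp [PySem.List.length_pyRange_one]
    have hpos : p + (k : Int) = ((W.length + k : Nat) : Int) := by subst hp; push_cast; ring
    rw [hpos, PySem.List.insert_natCast _ _ _ (by simp [hlen])]
    rw [show W.length + k = ((W ++ (PySem.List.pyRange 0 (k : Int) 1).map (coopLabel lbl)).length) from by simp [hlen]]
    rw [List.take_left, List.drop_left]
    simp [List.append_assoc]

lemma loopI (lbl : String) (n : Int) (W post : List String) (p : Int) (hp : p = W.length) :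
    List.foldl (fun ns2 i => PySem.List.insert ns2 (p + i) (coopLabel lbl i)) (W ++ post)
      (PySem.List.pyRange 0 n 1)
    = W ++ (PySem.List.pyRange 0 n 1).map (coopLabel lbl) ++ post := by
  rcases (by omega : n ≤ 0 ∨ 0 < n) with h | h
  · rw [PySem.List.pyRange_one_eq_nil (by omega)]; simp
  · rw [show n = ((n.toNat : Nat) : Int) from (Int.toNat_of_nonneg h.le).symm]
    exact loopN lbl n.toNat W post p hp

lemma stepL (lbl : String) (n : Int) (pre post : List String) (h : lbl ∉ pre) :
    List.foldl
      (fun ns2 i => PySem.List.insert ns2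
        ((((PySem.List.index? (pre ++ lbl :: post) lbl).getD 0 : Nat) : Int) + 1 + i) (coopLabel lbl i))
      (pre ++ lbl :: post) (PySem.List.pyRange 0 n 1)
    = pre ++ lbl :: ((PySem.List.pyRange 0 n 1).map (coopLabel lbl) ++ post) := by
  rw [index_pre lbl pre post h]
  simp only [Option.getD_some]
  rw [show pre ++ lbl :: post = (pre ++ [lbl]) ++ post from by simp]
  rw [loopI lbl n (pre ++ [lbl]) post ((pre.length : Int) + 1) (by simp)]
  simp [List.append_assoc]

-- ===== VERDICT (by name: the statement is the Claim_ definition above) =====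
theorem build_nation_pool_spec : Claim_equal_build_nation_pool := by
  intro ov _
  show build_nation_pool ov = build_nation_pool_alt ov
  simp only [build_nation_pool, build_nation_pool_alt]
  generalize coopValues ov = cv
  rw [show MAJOR_NATION_LABELS.items = [("usa", "USA 🇺🇸"), ("uk", "UK 🇬🇧"), ("ger", "GER 🇩🇪"), ("ita", "ITA 🇮🇹"), ("sov", "SOV 🇷🇺"), ("japan", "JAPAN 🇯🇵")] from rfl,
      show MAJOR_NATION_LABELS.getD "usa" "" = "USA 🇺🇸" from rfl,
      show MAJOR_NATION_LABELS.getD "uk" "" = "UK 🇬🇧" from rfl,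
      show MAJOR_NATION_LABELS.getD "ger" "" = "GER 🇩🇪" from rfl,
      show MAJOR_NATION_LABELS.getD "ita" "" = "ITA 🇮🇹" from rfl,
      show MAJOR_NATION_LABELS.getD "sov" "" = "SOV 🇷🇺" from rfl,
      show MAJOR_NATION_LABELS.getD "japan" "" = "JAPAN 🇯🇵" from rfl]
  rw [show ["USA 🇺🇸", "UK 🇬🇧", "FRA 🇫🇷", "POL 🇵🇱", "RAJ 🇮🇳", "CAN 🇨🇦", "SAF 🇿🇦", "AST 🇦🇺", "BRA 🇧🇷", "MEX 🇲🇽", "NET 🇳🇱", "GER 🇩🇪", "ITA 🇮🇹", "ROM 🇷🇴", "HUN 🇭🇺", "BUL 🇧🇬", "FIN 🇫🇮", "SPN 🇪🇸", "YUG 🇷🇸", "DEN 🇩🇰", "VICHY 🇫🇷", "SOV 🇷🇺", "MON 🇲🇳", "JAPAN 🇯🇵", "MAN 🇨🇳", "SIA 🇹🇭"] = ([] : List String) ++ "USA 🇺🇸" :: ["UK 🇬🇧", "FRA 🇫🇷", "POL 🇵🇱", "RAJ 🇮🇳", "CAN 🇨🇦", "SAF 🇿🇦", "AST 🇦🇺",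 "BRA 🇧🇷", "MEX 🇲🇽", "NET 🇳🇱", "GER 🇩🇪", "ITA 🇮🇹", "ROM 🇷🇴", "HUN 🇭🇺", "BUL 🇧🇬", "FIN 🇫🇮", "SPN 🇪🇸", "YUG 🇷🇸", "DEN 🇩🇰", "VICHY 🇫🇷", "SOV 🇷🇺", "MON 🇲🇳", "JAPAN 🇯🇵", "MAN 🇨🇳", "SIA 🇹🇭"] from rfl]
  rw [List.foldl_cons]
  rw [stepL "USA 🇺🇸" (cv.getD "usa" 0) ([] : List String) ["UK 🇬🇧", "FRA 🇫🇷", "POL 🇵🇱", "RAJ 🇮🇳", "CAN 🇨🇦", "SAF 🇿🇦", "AST 🇦🇺", "BRA 🇧🇷", "MEX 🇲🇽", "NET 🇳🇱", "GER 🇩🇪", "ITA 🇮🇹", "ROM 🇷🇴", "HUN 🇭🇺", "BUL 🇧🇬", "FIN 🇫🇮", "SPN 🇪🇸", "YUG 🇷🇸", "DEN 🇩🇰", "VICHY 🇫🇷", "SOV 🇷🇺", "MON 🇲🇳", "JAPAN 🇯🇵", "MAN 🇨🇳", "SIA 🇹🇭"] (by simp)]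
  rw [List.foldl_cons]
  rw [show ([] : List String) ++ "USA 🇺🇸" :: ((PySem.List.pyRange 0 (cv.getD "usa" 0) 1).map (coopLabel "USA 🇺🇸") ++ ["UK 🇬🇧", "FRA 🇫🇷", "POL 🇵🇱", "RAJ 🇮🇳", "CAN 🇨🇦", "SAF 🇿🇦", "AST 🇦🇺", "BRA 🇧🇷", "MEX 🇲🇽", "NET 🇳🇱", "GER 🇩🇪", "ITA 🇮🇹", "ROM 🇷🇴", "HUN 🇭🇺", "BUL 🇧🇬", "FIN 🇫🇮", "SPN 🇪🇸", "YUG 🇷🇸", "DEN 🇩🇰", "VICHY 🇫🇷", "SOV 🇷🇺", "MON 🇲🇳", "JAPAN 🇯🇵", "MAN 🇨🇳", "SIA 🇹🇭"]) = (([] : List String) ++ "USA 🇺🇸" :: ((PySem.List.pyRange 0 (cv.getD "usa" 0) 1).map (coopLabel "USA 🇺🇸"))) ++ "UK 🇬🇧" :: ["FRA 🇫🇷", "POL 🇵🇱", "RAJ 🇮🇳", "CAN 🇨🇦", "SAF 🇿🇦", "AST 🇦🇺", "BRA 🇧🇷", "MEX 🇲🇽", "NET 🇳🇱", "GER 🇩🇪",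 "ITA 🇮🇹", "ROM 🇷🇴", "HUN 🇭🇺", "BUL 🇧🇬", "FIN 🇫🇮", "SPN 🇪🇸", "YUG 🇷🇸", "DEN 🇩🇰", "VICHY 🇫🇷", "SOV 🇷🇺", "MON 🇲🇳", "JAPAN 🇯🇵", "MAN 🇨🇳", "SIA 🇹🇭"] from by simp only [List.nil_append, List.cons_append]]
  rw [stepL "UK 🇬🇧" (cv.getD "uk" 0) (([] : List String) ++ "USA 🇺🇸" :: ((PySem.List.pyRange 0 (cv.getD "usa" 0) 1).map (coopLabel "USA 🇺🇸"))) ["FRA 🇫🇷", "POL 🇵🇱", "RAJ 🇮🇳", "CAN 🇨🇦", "SAF 🇿🇦", "AST 🇦🇺", "BRA 🇧🇷", "MEX 🇲🇽", "NET 🇳🇱", "GER 🇩🇪", "ITA 🇮🇹", "ROM 🇷🇴", "HUN 🇭🇺", "BUL 🇧🇬", "FIN 🇫🇮", "SPN 🇪🇸", "YUG 🇷🇸", "DEN 🇩🇰", "VICHY 🇫🇷", "SOV 🇷🇺", "MON 🇲🇳", "JAPAN 🇯🇵", "MAN 🇨🇳", "SIA 🇹🇭"] (by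
    intro hm
    simp only [List.nil_append, List.mem_cons, List.mem_map] at hm
    rcases hm with he | ⟨i, -, hi⟩
    all_goals first
      | exact absurd he (by simp)
      | (refine coop_ne _ _ _ ?_ hi; simp))]
  rw [List.foldl_cons]
  rw [show (([] : List String) ++ "USA 🇺🇸" :: ((PySem.List.pyRange 0 (cv.getD "usa" 0) 1).map (coopLabel "USA 🇺🇸"))) ++ "UK 🇬🇧" :: ((PySem.List.pyRange 0 (cv.getD "uk" 0) 1).map (coopLabel "UK 🇬🇧") ++ ["FRA 🇫🇷", "POL 🇵🇱", "RAJ 🇮🇳", "CAN 🇨🇦", "SAF 🇿🇦", "AST 🇦🇺", "BRA 🇧🇷", "MEX 🇲🇽", "NET 🇳🇱", "GER 🇩🇪", "ITA 🇮🇹", "ROM 🇷🇴", "HUN 🇭🇺", "BUL 🇧🇬", "FIN 🇫🇮", "SPN 🇪🇸", "YUG 🇷🇸", "DEN 🇩🇰", "VICHY 🇫🇷", "SOV 🇷🇺", "MON 🇲🇳", "JAPAN 🇯🇵", "MAN 🇨🇳", "SIA 🇹🇭"]) = ((([] : List String) ++ "USA 🇺🇸" :: ((PySem.List.pyRange 0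 (cv.getD "usa" 0) 1).map (coopLabel "USA 🇺🇸"))) ++ "UK 🇬🇧" :: ((PySem.List.pyRange 0 (cv.getD "uk" 0) 1).map (coopLabel "UK 🇬🇧") ++ ["FRA 🇫🇷", "POL 🇵🇱", "RAJ 🇮🇳", "CAN 🇨🇦", "SAF 🇿🇦", "AST 🇦🇺", "BRA 🇧🇷", "MEX 🇲🇽", "NET 🇳🇱"])) ++ "GER 🇩🇪" :: ["ITA 🇮🇹", "ROM 🇷🇴", "HUN 🇭🇺", "BUL 🇧🇬", "FIN 🇫🇮", "SPN 🇪🇸", "YUG 🇷🇸", "DEN 🇩🇰", "VICHY 🇫🇷", "SOV 🇷🇺", "MON 🇲🇳", "JAPAN 🇯🇵", "MAN 🇨🇳", "SIA 🇹🇭"] from by simp only [List.nil_append, List.cons_append, List.append_assoc]]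
  rw [stepL "GER 🇩🇪" (cv.getD "ger" 0) ((([] : List String) ++ "USA 🇺🇸" :: ((PySem.List.pyRange 0 (cv.getD "usa" 0) 1).map (coopLabel "USA 🇺🇸"))) ++ "UK 🇬🇧" :: ((PySem.List.pyRange 0 (cv.getD "uk" 0) 1).map (coopLabel "UK 🇬🇧") ++ ["FRA 🇫🇷", "POL 🇵🇱", "RAJ 🇮🇳", "CAN 🇨🇦", "SAF 🇿🇦", "AST 🇦🇺", "BRA 🇧🇷", "MEX 🇲🇽", "NET 🇳🇱"])) ["ITA 🇮🇹", "ROM 🇷🇴", "HUN 🇭🇺", "BUL 🇧🇬", "FIN 🇫🇮", "SPN 🇪🇸", "YUG 🇷🇸", "DEN 🇩🇰", "VICHY 🇫🇷", "SOV 🇷🇺", "MON 🇲🇳", "JAPAN 🇯🇵", "MAN 🇨🇳", "SIA 🇹🇭"] (by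
    intro hm
    simp only [List.nil_append, List.mem_cons, List.mem_append, List.mem_map] at hm
    rcases hm with (he | ⟨i, -, hi⟩) | he | ⟨i, -, hi⟩ | he | he | he | he | he | he | he | he | he
    all_goals first
      | exact absurd he (by simp)
      | (refine coop_ne _ _ _ ?_ hi; simp))]
  rw [List.foldl_cons]
  rw [show ((([] : List String) ++ "USA 🇺🇸" :: ((PySem.List.pyRange 0 (cv.getD "usa" 0) 1).map (coopLabel "USA 🇺🇸"))) ++ "UK 🇬🇧" :: ((PySem.List.pyRange 0 (cv.getD "uk" 0) 1).map (coopLabel "UK 🇬🇧") ++ ["FRA 🇫🇷", "POL 🇵🇱", "RAJ 🇮🇳", "CAN 🇨🇦", "SAF 🇿🇦", "AST 🇦🇺", "BRA 🇧🇷", "MEX 🇲🇽", "NET 🇳🇱"])) ++ "GER 🇩🇪" :: ((PySem.List.pyRange 0 (cv.getD "ger" 0) 1).map (coopLabel "GER 🇩🇪") ++ ["ITA 🇮🇹", "ROM 🇷🇴", "HUN 🇭🇺", "BUL 🇧🇬", "FIN 🇫🇮", "SPN 🇪🇸", "YUG 🇷🇸", "DEN 🇩🇰", "VICHY 🇫🇷",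 "SOV 🇷🇺", "MON 🇲🇳", "JAPAN 🇯🇵", "MAN 🇨🇳", "SIA 🇹🇭"]) = (((([] : List String) ++ "USA 🇺🇸" :: ((PySem.List.pyRange 0 (cv.getD "usa" 0) 1).map (coopLabel "USA 🇺🇸"))) ++ "UK 🇬🇧" :: ((PySem.List.pyRange 0 (cv.getD "uk" 0) 1).map (coopLabel "UK 🇬🇧") ++ ["FRA 🇫🇷", "POL 🇵🇱", "RAJ 🇮🇳", "CAN 🇨🇦", "SAF 🇿🇦", "AST 🇦🇺", "BRA 🇧🇷", "MEX 🇲🇽", "NET 🇳🇱"])) ++ "GER 🇩🇪" :: ((PySem.List.pyRange 0 (cv.getD "ger" 0) 1).map (coopLabel "GER 🇩🇪"))) ++ "ITA 🇮🇹" :: ["ROM 🇷🇴", "HUN 🇭🇺", "BUL 🇧🇬", "FIN 🇫🇮", "SPN 🇪🇸", "YUG 🇷🇸", "DEN 🇩🇰", "VICHY 🇫🇷", "SOV 🇷🇺", "MON 🇲🇳", "JAPAN 🇯🇵", "MAN 🇨🇳", "SIA 🇹🇭"] from by simp only [List.nil_append, List.cons_append, List.append_assoc]]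
  rw [stepL "ITA 🇮🇹" (cv.getD "ita" 0) (((([] : List String) ++ "USA 🇺🇸" :: ((PySem.List.pyRange 0 (cv.getD "usa" 0) 1).map (coopLabel "USA 🇺🇸"))) ++ "UK 🇬🇧" :: ((PySem.List.pyRange 0 (cv.getD "uk" 0) 1).map (coopLabel "UK 🇬🇧") ++ ["FRA 🇫🇷", "POL 🇵🇱", "RAJ 🇮🇳", "CAN 🇨🇦", "SAF 🇿🇦", "AST 🇦🇺", "BRA 🇧🇷", "MEX 🇲🇽", "NET 🇳🇱"])) ++ "GER 🇩🇪" :: ((PySem.List.pyRange 0 (cv.getD "ger" 0) 1).map (coopLabel "GER 🇩🇪"))) ["ROM 🇷🇴", "HUN 🇭🇺", "BUL 🇧🇬", "FIN 🇫🇮", "SPN 🇪🇸", "YUG 🇷🇸", "DEN 🇩🇰", "VICHY 🇫🇷", "SOV 🇷🇺", "MON 🇲🇳", "JAPAN 🇯🇵", "MAN 🇨🇳", "SIA 🇹🇭"] (by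
    intro hm
    simp only [List.nil_append, List.mem_cons, List.mem_append, List.mem_map] at hm
    rcases hm with ((he | ⟨i, -, hi⟩) | he | ⟨i, -, hi⟩ | he | he | he | he | he | he | he | he | he) | he | ⟨i, -, hi⟩
    all_goals first
      | exact absurd he (by simp)
      | (refine coop_ne _ _ _ ?_ hi; simp))]
  rw [List.foldl_cons]
  rw [show (((([] : List String) ++ "USA 🇺🇸" :: ((PySem.List.pyRange 0 (cv.getD "usa" 0) 1).map (coopLabel "USA 🇺🇸"))) ++ "UK 🇬🇧" :: ((PySem.List.pyRange 0 (cv.getD "uk" 0) 1).map (coopLabel "UK 🇬🇧") ++ ["FRA 🇫🇷", "POL 🇵🇱", "RAJ 🇮🇳", "CAN 🇨🇦", "SAF 🇿🇦", "AST 🇦🇺", "BRA 🇧🇷", "MEX 🇲🇽", "NET 🇳🇱"])) ++ "GER 🇩🇪" :: ((PySem.List.pyRange 0 (cv.getD "ger" 0) 1).map (coopLabel "GER 🇩🇪"))) ++ "ITA 🇮🇹" :: ((PySem.List.pyRange 0 (cv.getD "ita" 0) 1).map (coopLabel "ITA 🇮🇹") ++ ["ROM 🇷🇴", "HUN 🇭🇺",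 "BUL 🇧🇬", "FIN 🇫🇮", "SPN 🇪🇸", "YUG 🇷🇸", "DEN 🇩🇰", "VICHY 🇫🇷", "SOV 🇷🇺", "MON 🇲🇳", "JAPAN 🇯🇵", "MAN 🇨🇳", "SIA 🇹🇭"]) = ((((([] : List String) ++ "USA 🇺🇸" :: ((PySem.List.pyRange 0 (cv.getD "usa" 0) 1).map (coopLabel "USA 🇺🇸"))) ++ "UK 🇬🇧" :: ((PySem.List.pyRange 0 (cv.getD "uk" 0) 1).map (coopLabel "UK 🇬🇧") ++ ["FRA 🇫🇷", "POL 🇵🇱", "RAJ 🇮🇳", "CAN 🇨🇦", "SAF 🇿🇦", "AST 🇦🇺", "BRA 🇧🇷", "MEX 🇲🇽", "NET 🇳🇱"])) ++ "GER 🇩🇪" :: ((PySem.List.pyRange 0 (cv.getD "ger" 0) 1).map (coopLabel "GER 🇩🇪"))) ++ "ITA 🇮🇹" :: ((PySem.List.pyRange 0 (cv.getD "ita" 0) 1).map (coopLabel "ITA 🇮🇹") ++ ["ROM 🇷🇴", "HUN 🇭🇺", "BUL 🇧🇬", "FIN 🇫🇮", "SPN 🇪🇸", "YUG 🇷🇸",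 "DEN 🇩🇰", "VICHY 🇫🇷"])) ++ "SOV 🇷🇺" :: ["MON 🇲🇳", "JAPAN 🇯🇵", "MAN 🇨🇳", "SIA 🇹🇭"] from by simp only [List.nil_append, List.cons_append, List.append_assoc]]
  rw [stepL "SOV 🇷🇺" (cv.getD "sov" 0) ((((([] : List String) ++ "USA 🇺🇸" :: ((PySem.List.pyRange 0 (cv.getD "usa" 0) 1).map (coopLabel "USA 🇺🇸"))) ++ "UK 🇬🇧" :: ((PySem.List.pyRange 0 (cv.getD "uk" 0) 1).map (coopLabel "UK 🇬🇧") ++ ["FRA 🇫🇷", "POL 🇵🇱", "RAJ 🇮🇳", "CAN 🇨🇦", "SAF 🇿🇦", "AST 🇦🇺", "BRA 🇧🇷", "MEX 🇲🇽", "NET 🇳🇱"])) ++ "GER 🇩🇪" :: ((PySem.List.pyRange 0 (cv.getD "ger" 0) 1).map (coopLabel "GER 🇩🇪"))) ++ "ITA 🇮🇹" :: ((PySem.List.pyRange 0 (cv.getD "ita" 0) 1).map (coopLabel "ITA 🇮🇹") ++ ["ROM 🇷🇴", "HUN 🇭🇺", "BUL 🇧🇬", "FIN 🇫🇮", "SPN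 🇪🇸", "YUG 🇷🇸", "DEN 🇩🇰", "VICHY 🇫🇷"])) ["MON 🇲🇳", "JAPAN 🇯🇵", "MAN 🇨🇳", "SIA 🇹🇭"] (by
    intro hm
    simp only [List.nil_append, List.mem_cons, List.mem_append, List.mem_map] at hm
    rcases hm with (((he | ⟨i, -, hi⟩) | he | ⟨i, -, hi⟩ | he | he | he | he | he | he | he | he | he) | he | ⟨i, -, hi⟩) | he | ⟨i, -, hi⟩ | he | he | he | he | he | he | he | he
    all_goals first
      | exact absurd he (by simp)
      | (refine coop_ne _ _ _ ?_ hi; simp))]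
  rw [List.foldl_cons]
  rw [show ((((([] : List String) ++ "USA 🇺🇸" :: ((PySem.List.pyRange 0 (cv.getD "usa" 0) 1).map (coopLabel "USA 🇺🇸"))) ++ "UK 🇬🇧" :: ((PySem.List.pyRange 0 (cv.getD "uk" 0) 1).map (coopLabel "UK 🇬🇧") ++ ["FRA 🇫🇷", "POL 🇵🇱", "RAJ 🇮🇳", "CAN 🇨🇦", "SAF 🇿🇦", "AST 🇦🇺", "BRA 🇧🇷", "MEX 🇲🇽", "NET 🇳🇱"])) ++ "GER 🇩🇪" :: ((PySem.List.pyRange 0 (cv.getD "ger" 0) 1).map (coopLabel "GER 🇩🇪"))) ++ "ITA 🇮🇹" :: ((PySem.List.pyRange 0 (cv.getD "ita" 0) 1).map (coopLabel "ITA 🇮🇹") ++ ["ROM 🇷🇴", "HUN 🇭🇺", "BUL 🇧🇬", "FIN 🇫🇮", "SPN 🇪🇸", "YUG 🇷🇸", "DEN 🇩🇰", "VICHY 🇫🇷"])) ++ "SOV 🇷🇺" :: ((PySem.List.pyRange 0 (cv.getD "sov" 0) 1).map (coopLabel "SOV 🇷🇺") ++ ["MON 🇲🇳", "JAPAN 🇯🇵",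 "MAN 🇨🇳", "SIA 🇹🇭"]) = (((((([] : List String) ++ "USA 🇺🇸" :: ((PySem.List.pyRange 0 (cv.getD "usa" 0) 1).map (coopLabel "USA 🇺🇸"))) ++ "UK 🇬🇧" :: ((PySem.List.pyRange 0 (cv.getD "uk" 0) 1).map (coopLabel "UK 🇬🇧") ++ ["FRA 🇫🇷", "POL 🇵🇱", "RAJ 🇮🇳", "CAN 🇨🇦", "SAF 🇿🇦", "AST 🇦🇺", "BRA 🇧🇷", "MEX 🇲🇽", "NET 🇳🇱"])) ++ "GER 🇩🇪" :: ((PySem.List.pyRange 0 (cv.getD "ger" 0) 1).map (coopLabel "GER 🇩🇪"))) ++ "ITA 🇮🇹" :: ((PySem.List.pyRange 0 (cv.getD "ita" 0) 1).map (coopLabel "ITA 🇮🇹") ++ ["ROM 🇷🇴", "HUN 🇭🇺", "BUL 🇧🇬", "FIN 🇫🇮", "SPN 🇪🇸", "YUG 🇷🇸", "DEN 🇩🇰", "VICHY 🇫🇷"])) ++ "SOV 🇷🇺" :: ((PySem.List.pyRange 0 (cv.getD "sov" 0) 1).map (coopLabel "SOV 🇷🇺") ++ ["MON 🇲🇳"]))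 ++ "JAPAN 🇯🇵" :: ["MAN 🇨🇳", "SIA 🇹🇭"] from by simp only [List.nil_append, List.cons_append, List.append_assoc]]
  rw [stepL "JAPAN 🇯🇵" (cv.getD "japan" 0) (((((([] : List String) ++ "USA 🇺🇸" :: ((PySem.List.pyRange 0 (cv.getD "usa" 0) 1).map (coopLabel "USA 🇺🇸"))) ++ "UK 🇬🇧" :: ((PySem.List.pyRange 0 (cv.getD "uk" 0) 1).map (coopLabel "UK 🇬🇧") ++ ["FRA 🇫🇷", "POL 🇵🇱", "RAJ 🇮🇳", "CAN 🇨🇦", "SAF 🇿🇦", "AST 🇦🇺", "BRA 🇧🇷", "MEX 🇲🇽", "NET 🇳🇱"])) ++ "GER 🇩🇪" :: ((PySem.List.pyRange 0 (cv.getD "ger" 0) 1).map (coopLabel "GER 🇩🇪"))) ++ "ITA 🇮🇹" :: ((PySem.List.pyRange 0 (cv.getD "ita" 0) 1).map (coopLabel "ITA 🇮🇹") ++ ["ROM 🇷🇴", "HUN 🇭🇺", "BUL 🇧🇬", "FIN 🇫🇮", "SPN 🇪🇸", "YUG 🇷🇸", "DEN 🇩🇰", "VICHY 🇫🇷"]))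 ++ "SOV 🇷🇺" :: ((PySem.List.pyRange 0 (cv.getD "sov" 0) 1).map (coopLabel "SOV 🇷🇺") ++ ["MON 🇲🇳"])) ["MAN 🇨🇳", "SIA 🇹🇭"] (by
    intro hm
    simp only [List.nil_append, List.mem_cons, List.mem_append, List.mem_map] at hm
    rcases hm with ((((he | ⟨i, -, hi⟩) | he | ⟨i, -, hi⟩ | he | he | he | he | he | he | he | he | he) | he | ⟨i, -, hi⟩) | he | ⟨i, -, hi⟩ | he | he | he | he | he | he | he | he) | he | ⟨i, -, hi⟩ | he
    all_goals first
      | exact absurd he (by simp)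
      | (refine coop_ne _ _ _ ?_ hi; simp))]
  rw [List.foldl_nil]
  simp only [BASE_ORDER, List.foldl_cons, List.foldl_nil]
  simp only [List.append_assoc, List.cons_append, List.singleton_append, List.nil_append]
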